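-- pv_equiv track=rewrite | github.com/CQCL/h-series-spring-2024-workshop | pytket-quantinuum/day2/04_from_circuits_to_microcanonical_timing.py | get_pauli_string
-- ===== SOURCE A (Python) =====
-- def get_pauli_string(N, lst):
--     s = ''
--     for j in range(N):
--         flag = 0
--         for op in lst:
--             if op[1]==j:
--                 s = s+op[0]
--                 flag = 1
--                 break
--         if flag ==0: s = s+'I'
--     return s
-- ===== SOURCE B (Python) =====
-- def get_pauli_string(N, lst):
--     res = ['I'] * N
--     for op in reversed(lst):
--         if 0 <= op[1] < N:
--             res[op[1]] = op[0]
--     return ''.join(res)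
-- ===== Notes on version B (the rewrite author's own statement) =====
-- stated objective: faster
-- what changed: Replaces the N x len(lst) nested gather (for each position scan lst for the first match) with a single reversed scatter pass into a preallocated ['I']*N buffer (last write in reversed order = first match in lst), then one join.
import Mathlib
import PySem

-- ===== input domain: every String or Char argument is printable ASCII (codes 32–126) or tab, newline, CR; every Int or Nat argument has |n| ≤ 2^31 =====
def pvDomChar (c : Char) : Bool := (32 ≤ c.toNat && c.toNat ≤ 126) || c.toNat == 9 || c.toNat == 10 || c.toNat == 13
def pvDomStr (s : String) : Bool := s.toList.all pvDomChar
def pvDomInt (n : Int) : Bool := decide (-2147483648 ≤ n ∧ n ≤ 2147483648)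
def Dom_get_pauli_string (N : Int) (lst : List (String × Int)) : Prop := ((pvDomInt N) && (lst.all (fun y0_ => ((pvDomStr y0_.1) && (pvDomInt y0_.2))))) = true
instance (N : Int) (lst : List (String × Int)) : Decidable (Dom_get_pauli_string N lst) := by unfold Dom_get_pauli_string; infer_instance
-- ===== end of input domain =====

-- B replaces A's N×|lst| nested gather with one reversed scatter pass into a
-- preallocated buffer plus a join (objective: faster, O(N+|lst|)).

-- ===== PORT A =====
-- A's inner loop: scan lst for the first op with op[1]==j, append op[0] and break;
-- if none matched (flag==0), append 'I'.
def pvInnerA (lst : List (String × Int)) (j : Int) (s : String) : String :=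
  match lst with
  | [] => s ++ "I"
  | op :: rest => if op.2 = j then s ++ op.1 else pvInnerA rest j s

def get_pauli_string (N : Int) (lst : List (String × Int)) : String :=
  (PySem.List.pyRange 0 N 1).foldl (fun s j => pvInnerA lst j s) ""

-- ===== PORT B =====
def get_pauli_string_alt (N : Int) (lst : List (String × Int)) : String :=
  let res := List.replicate N.toNat "I"
  let res := lst.reverse.foldl
    (fun r op => if 0 ≤ op.2 ∧ op.2 < N then r.set op.2.toNat op.1 else r) res
  String.join res

-- ===== PRECONDITION & SPEC =====
def Spec_get_pauli_string (N : Int) (lst : List (String × Int)) (out : String) : Prop := out = get_pauli_string_alt N lst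
instance (N : Int) (lst : List (String × Int)) (out : String) : Decidable (Spec_get_pauli_string N lst out) := by unfold Spec_get_pauli_string; infer_instance

-- ===== CLAIM (what is proved, stated in full; the proofs are below) =====
def Claim_equal_get_pauli_string : Prop := ∀ (N : Int) (lst : List (String × Int)), Dom_get_pauli_string N lst → Spec_get_pauli_string N lst (get_pauli_string N lst)

-- ===== LEMMAS AND PROOFS =====

/-- First match in `lst` at position `j`, defaulting to "I". -/
def pvFirst (lst : List (String × Int)) (j : Int) : String :=
  match lst with
  | [] => "I"
  | op :: rest => if op.2 = j then op.1 else pvFirst rest j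

theorem pvFoldl_append (l : List String) (c : String) :
    l.foldl (fun r s => r ++ s) c = c ++ l.foldl (fun r s => r ++ s) "" := by
  induction l generalizing c with
  | nil => simp
  | cons x xs ih =>
    rw [List.foldl_cons, ih, List.foldl_cons, ih ("" ++ x)]
    simp [String.append_assoc]

theorem pvJoin_cons (s : String) (l : List String) :
    String.join (s :: l) = s ++ String.join l := by
  simp only [String.join, List.foldl_cons]
  rw [pvFoldl_append]; simp

theorem pvInnerA_eq (lst : List (String × Int)) (j : Int) (s : String) :
    pvInnerA lst j s = s ++ pvFirst lst j := by
  induction lst with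
  | nil => rfl
  | cons op rest ih =>
    simp only [pvInnerA, pvFirst]
    split_ifs <;> simp [ih]

theorem foldl_append_first (lst : List (String × Int)) (l : List Int) (c : String) :
    l.foldl (fun s j => pvInnerA lst j s) c = c ++ String.join (l.map (pvFirst lst)) := by
  induction l generalizing c with
  | nil => simp [String.join]
  | cons j rest ih =>
    rw [List.foldl_cons, pvInnerA_eq, ih, List.map_cons, pvJoin_cons, String.append_assoc]

theorem scatter_foldr (N : Int) (lst : List (String × Int)) :
    lst.foldr (fun op r => if 0 ≤ op.2 ∧ op.2 < N then r.set op.2.toNat op.1 else r)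
        (List.replicate N.toNat "I")
      = (List.range N.toNat).map (fun (k : Nat) => pvFirst lst (k : Int)) := by
  induction lst with
  | nil =>
    simp [pvFirst, List.map_const']
  | cons op rest ih =>
    simp only [List.foldr_cons, ih]
    by_cases h : 0 ≤ op.2 ∧ op.2 < N
    · simp only [if_pos h]
      apply List.ext_getElem
      · simp
      · intro k h1 h2
        have hk : k < N.toNat := by simpa using h2
        rw [List.getElem_set]
        simp only [List.getElem_map, List.getElem_range, pvFirst]
        by_cases he : op.2.toNat = k
        · have hz : op.2 = (k : Int) := by omega
          simp [hz]
        · have hz : ¬ op.2 = (k : Int) := by omega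
          simp [he, hz]
    · simp only [if_neg h]
      apply List.map_congr_left
      intro k hk
      simp only [List.mem_range] at hk
      have hz : ¬ op.2 = (k : Int) := by omega
      simp [pvFirst, hz]

theorem scatter_eq (N : Int) (lst : List (String × Int)) :
    lst.reverse.foldl (fun r op => if 0 ≤ op.2 ∧ op.2 < N then r.set op.2.toNat op.1 else r)
        (List.replicate N.toNat "I")
      = (List.range N.toNat).map (fun (k : Nat) => pvFirst lst (k : Int)) := by
  rw [List.foldl_reverse]
  exact scatter_foldr N lst

-- ===== VERDICT (by name: the statement is the Claim_ definition above) =====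
theorem get_pauli_string_spec : Claim_equal_get_pauli_string := by
  intro N lst _
  unfold Spec_get_pauli_string get_pauli_string get_pauli_string_alt
  rw [foldl_append_first]
  simp only [scatter_eq, PySem.List.pyRange_one, List.map_map]
  simp only [Function.comp_def, zero_add]
  simp
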